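-- pv_equiv track=rewrite | github.com/Jamesprocode/FullPageJazzOMR | datasets/stacking.py | _strip_leading_linebreaks
-- ===== SOURCE A (Python) =====
-- def _strip_leading_linebreaks(tokens):
--     """Remove !!linebreak:original lines that appear before the first barline.
--
--     System files from the middle of a page include !!linebreak:original in
--     their header area (between the kern spine declarations and the first =
--     barline).  When used as the first system in a stack (j=0), this must be
--     dropped so the stacked page never opens with a linebreak marker.
--     """
--     lines, cur = [], []
--     for tok in tokens:
--         cur.append(tok)
--         if tok == "<n>":
--             lines.append(cur)
--             cur = []
--     if cur:
--         lines.append(cur)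
--
--     result = []
--     first_barline_seen = False
--     for line in lines:
--         content = [t for t in line if t not in ("<t>", "<n>")]
--         if first_barline_seen:
--             result.extend(line)
--         elif any(t.startswith("=") for t in content):
--             first_barline_seen = True
--             result.extend(line)
--         elif any(t == "!!linebreak:original" for t in content):
--             pass  # drop — no place before the first barline
--         else:
--             result.extend(line)
--     return result
-- ===== SOURCE B (Python) =====
-- def _strip_leading_linebreaks(tokens):
--     """Two opposite-direction passes: a forward index scan locates the start of
--     the line holding the first barline (everything from that index on is kept
--     verbatim as a slice); a backward scan over the remaining prefix rebuilds it
--     while dropping whole lines that contain the linebreak marker."""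
--     # Pass 1 (forward): cut = start index of the line with the first barline.
--     cut = len(tokens)
--     start = 0
--     for i, t in enumerate(tokens):
--         if t.startswith("="):
--             cut = start
--             break
--         if t == "<n>":
--             start = i + 1
--     head, tail = tokens[:cut], tokens[cut:]
--     # Pass 2 (backward over head, which lies wholly before the first barline):
--     # collect each line right-to-left (so reversed), keep it unless it
--     # contains the marker.
--     cur = []      # current line, collected right-to-left (reversed)
--     kept = []     # kept (reversed) lines, rightmost line first
--     for t in reversed(head):
--         if t == "<n>":
--             if "!!linebreak:original" not in cur:
--                 kept.append(cur)
--             cur = [t]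
--         else:
--             cur.append(t)
--     if "!!linebreak:original" not in cur:
--         kept.append(cur)
--     out = []
--     for line in reversed(kept):
--         out.extend(reversed(line))
--     return out + tail
-- ===== Notes on version B (the rewrite author's own statement) =====
-- stated objective: alternative
-- what changed: Replaced A's split-into-lines-then-classify-with-a-seen-flag pipeline by two opposite-direction index scans: a forward scan computes the start index of the line holding the first barline (that suffix is emitted verbatim as a slice, no flag and no per-line classification there), and a backward scan over the prefix rebuilds it right-to-left dropping whole marker lines.
import Mathlib
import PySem

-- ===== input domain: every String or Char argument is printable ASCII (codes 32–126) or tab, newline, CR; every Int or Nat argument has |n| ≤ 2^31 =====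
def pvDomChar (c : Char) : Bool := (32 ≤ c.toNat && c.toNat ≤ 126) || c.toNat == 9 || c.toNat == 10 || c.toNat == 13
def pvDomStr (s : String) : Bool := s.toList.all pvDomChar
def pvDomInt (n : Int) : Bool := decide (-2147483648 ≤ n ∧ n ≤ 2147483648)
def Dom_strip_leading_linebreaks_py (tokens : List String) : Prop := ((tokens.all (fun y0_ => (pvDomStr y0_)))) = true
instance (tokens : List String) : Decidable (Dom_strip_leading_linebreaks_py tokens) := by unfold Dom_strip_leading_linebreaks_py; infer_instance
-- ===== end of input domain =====

-- B replaces A's split-into-lines-then-classify pipeline by two opposite-direction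
-- index scans: a forward scan finds the start of the first barline's line (suffix
-- kept verbatim as a slice), a backward scan rebuilds the prefix dropping marker
-- lines (objective: alternative).

-- ===== PORT A =====
-- first loop of A: split the token stream into lines at "<n>" (trailing partial line kept)
def pvBuildLinesA : List String → List String → List (List String)
  | [], cur => if cur.isEmpty then [] else [cur]
  | t :: ts, cur =>
    let cur' := cur ++ [t]
    if t = "<n>" then cur' :: pvBuildLinesA ts [] else pvBuildLinesA ts cur'

-- second loop of A over the built lines, carrying first_barline_seen
def pvResolveA : List (List String) → Bool → List String
  | [], _ => []
  | line :: ls, seen =>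
    let content := line.filter (fun t => !(t == "<t>" || t == "<n>"))
    if seen then line ++ pvResolveA ls seen
    else if content.any (fun t => PySem.Str.startswith t "=") then line ++ pvResolveA ls true
    else if content.any (fun t => t == "!!linebreak:original") then pvResolveA ls seen
    else line ++ pvResolveA ls seen

def strip_leading_linebreaks_py (tokens : List String) : List String :=
  pvResolveA (pvBuildLinesA tokens []) false

-- ===== PORT B =====
-- B's forward loop: cut = start index of the line holding the first barline
-- (i = current index, start = start index of the current line; falls off to len)
def pvCutB : List String → Nat → Nat → Nat
  | [], i, _ => i
  | t :: ts, i, start =>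
    if PySem.Str.startswith t "=" then start
    else pvCutB ts (i + 1) (if t = "<n>" then i + 1 else start)

-- B's backward loop body: state = (cur reversed current line, kept reversed lines)
def pvStepB (st : List String × List (List String)) (t : String) :
    List String × List (List String) :=
  if t = "<n>" then
    (["<n>"], if st.1.contains "!!linebreak:original" then st.2 else st.2 ++ [st.1])
  else (st.1 ++ [t], st.2)

def strip_leading_linebreaks_py_alt (tokens : List String) : List String :=
  let cut := pvCutB tokens 0 0
  let head := tokens.take cut        -- tokens[:cut] with 0 ≤ cut (exact)
  let tail := tokens.drop cut        -- tokens[cut:]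
  let st := head.reverse.foldl pvStepB ([], [])   -- for t in reversed(head)
  let kept := if st.1.contains "!!linebreak:original" then st.2 else st.2 ++ [st.1]
  -- for line in reversed(kept): out.extend(reversed(line))
  (kept.reverse.foldl (fun o l => o ++ l.reverse) []) ++ tail

-- ===== PRECONDITION & SPEC =====
def Spec_strip_leading_linebreaks_py (tokens : List String) (out : List String) : Prop := out = strip_leading_linebreaks_py_alt tokens
instance (tokens : List String) (out : List String) : Decidable (Spec_strip_leading_linebreaks_py tokens out) := by unfold Spec_strip_leading_linebreaks_py; infer_instance

-- ===== CLAIM (what is proved, stated in full; the proofs are below) =====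
def Claim_equal_strip_leading_linebreaks_py : Prop := ∀ (tokens : List String), Dom_strip_leading_linebreaks_py tokens → Spec_strip_leading_linebreaks_py tokens (strip_leading_linebreaks_py tokens)

-- ===== LEMMAS AND PROOFS =====

-- drop the whole line iff it contains the marker (the value both programs give a head line)
def pvDropIf (line : List String) : List String :=
  if line.contains "!!linebreak:original" then [] else line

-- B's head-processing as a single function of the head (what the two backward loops compute)
def pvHeadB (head : List String) : List String :=
  let st := head.reverse.foldl pvStepB ([], [])
  let kept := if st.1.contains "!!linebreak:original" then st.2 else st.2 ++ [st.1]
  kept.reverse.foldl (fun o l => o ++ l.reverse) []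

theorem pv_altB_eq (tokens : List String) :
    strip_leading_linebreaks_py_alt tokens
      = pvHeadB (tokens.take (pvCutB tokens 0 0)) ++ tokens.drop (pvCutB tokens 0 0) := rfl

-- A's content filter (dropping "<t>"/"<n>") is invisible to a predicate false on both
theorem pv_any_filter (q : String → Bool) (hq1 : q "<t>" = false) (hq2 : q "<n>" = false)
    (line : List String) :
    (line.filter (fun t => !(t == "<t>" || t == "<n>"))).any q = line.any q := by
  induction line with
  | nil => rfl
  | cons a as ih =>
    by_cases h1 : a = "<t>"
    · subst h1
      rw [List.filter_cons_of_neg (by decide)]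
      simp only [List.any_cons, hq1, Bool.false_or, ih]
    · by_cases h2 : a = "<n>"
      · subst h2
        rw [List.filter_cons_of_neg (by decide)]
        simp only [List.any_cons, hq2, Bool.false_or, ih]
      · rw [List.filter_cons_of_pos (by simp [h1, h2])]
        simp only [List.any_cons, ih]

-- once the flag is set, A copies the remaining lines verbatim
theorem pv_resolveA_true (ls : List (List String)) :
    pvResolveA ls true = ls.flatten := by
  induction ls with
  | nil => rfl
  | cons l ls ih => simp [pvResolveA, ih]

-- A's line splitter flattens back to the input
theorem pv_buildLines_flatten (ts : List String) : ∀ cur,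
    (pvBuildLinesA ts cur).flatten = cur ++ ts := by
  induction ts with
  | nil => intro cur; by_cases h : cur.isEmpty <;>
      simp_all [pvBuildLinesA, List.isEmpty_iff]
  | cons t ts ih =>
    intro cur
    simp only [pvBuildLinesA]
    by_cases h : t = "<n>" <;> simp [h, ih]

-- splitting off the first line
theorem pv_buildLines_split (pre rest : List String) (hpre : "<n>" ∉ pre) : ∀ cur,
    pvBuildLinesA (pre ++ "<n>" :: rest) cur
      = (cur ++ pre ++ ["<n>"]) :: pvBuildLinesA rest [] := by
  induction pre with
  | nil => intro cur; simp [pvBuildLinesA]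
  | cons p pre ih =>
    intro cur
    have hp : p ≠ "<n>" := fun h => hpre (h ▸ List.mem_cons_self)
    have hpre' : "<n>" ∉ pre := fun h => hpre (List.mem_cons_of_mem _ h)
    simp only [List.cons_append, pvBuildLinesA, if_neg hp]
    rw [ih hpre' (cur ++ [p])]
    simp

theorem pv_buildLines_noN (ts : List String) (h : "<n>" ∉ ts) : ∀ cur,
    pvBuildLinesA ts cur = if (cur ++ ts).isEmpty then [] else [cur ++ ts] := by
  induction ts with
  | nil => intro cur; simp [pvBuildLinesA]
  | cons t ts ih =>
    intro cur
    have ht : t ≠ "<n>" := fun hh => h (hh ▸ List.mem_cons_self)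
    simp only [pvBuildLinesA, if_neg ht]
    rw [ih (fun hh => h (List.mem_cons_of_mem _ hh)) (cur ++ [t])]
    simp

-- pvCutB shifts uniformly with its counters
theorem pv_cut_shift (ts : List String) : ∀ i s d,
    pvCutB ts (i + d) (s + d) = pvCutB ts i s + d := by
  induction ts with
  | nil => intro i s d; rfl
  | cons t ts ih =>
    intro i s d
    simp only [pvCutB]
    split_ifs with hb hn
    · rfl
    · rw [show i + d + 1 = (i + 1) + d by omega]
      exact ih (i + 1) (i + 1) d
    · rw [show i + d + 1 = (i + 1) + d by omega]
      exact ih (i + 1) s d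

theorem pv_cut_split (pre rest : List String) (hpre : "<n>" ∉ pre) : ∀ i s,
    pvCutB (pre ++ "<n>" :: rest) i s
      = if pre.any (fun t => PySem.Str.startswith t "=") then s
        else pvCutB rest (i + pre.length + 1) (i + pre.length + 1) := by
  induction pre with
  | nil =>
    intro i s
    simp only [List.nil_append, pvCutB]
    rw [if_neg (by decide)]
    simp
  | cons p pre ih =>
    intro i s
    have hp : p ≠ "<n>" := fun h => hpre (h ▸ List.mem_cons_self)
    have hpre' : "<n>" ∉ pre := fun hh => hpre (List.mem_cons_of_mem _ hh)
    simp only [List.cons_append, pvCutB, List.any_cons]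
    by_cases hb : PySem.Str.startswith p "=" = true
    · rw [if_pos hb, if_pos (by rw [Bool.or_eq_true]; exact Or.inl hb)]
    · rw [if_neg hb, if_neg hp, ih hpre' (i + 1) s]
      by_cases h2 : (pre.any fun t => PySem.Str.startswith t "=") = true
      · rw [if_pos h2, if_pos (by rw [Bool.or_eq_true]; exact Or.inr h2)]
      · rw [if_neg h2, if_neg (by rw [Bool.or_eq_true]; rintro (h | h); exacts [hb h, h2 h])]
        congr 1 <;> simp <;> omega

theorem pv_cut_noN (ts : List String) (hn : "<n>" ∉ ts)
    (hb : ts.any (fun t => PySem.Str.startswith t "=") = false) : ∀ i s,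
    pvCutB ts i s = i + ts.length := by
  induction ts with
  | nil => intro i s; rfl
  | cons t ts ih =>
    intro i s
    rw [List.any_cons, Bool.or_eq_false_iff] at hb
    have ht : t ≠ "<n>" := fun hh => hn (hh ▸ List.mem_cons_self)
    simp only [pvCutB]
    rw [if_neg (fun hh => by rw [hb.1] at hh; exact Bool.false_ne_true hh), if_neg ht]
    rw [ih (fun hh => hn (List.mem_cons_of_mem _ hh)) hb.2 (i + 1) s]
    simp only [List.length_cons]
    omega

-- the backward fold over a run without "<n>" only extends cur
theorem pv_foldB_pre (pre : List String) (hpre : "<n>" ∉ pre) :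
    ∀ (c : List String) (k : List (List String)),
    List.foldr (fun t st => pvStepB st t) (c, k) pre = (c ++ pre.reverse, k) := by
  induction pre with
  | nil => intro c k; simp
  | cons p pre ih =>
    intro c k
    have hp : p ≠ "<n>" := fun h => hpre (h ▸ List.mem_cons_self)
    simp only [List.foldr_cons, ih (fun hh => hpre (List.mem_cons_of_mem _ hh))]
    simp [pvStepB, if_neg hp]

-- restate pvHeadB through a foldr
theorem pv_headB_foldr (head : List String) :
    pvHeadB head
      = (let st := List.foldr (fun t st => pvStepB st t) ([], []) head
         let kept := if st.1.contains "!!linebreak:original" then st.2 else st.2 ++ [st.1]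
         kept.reverse.foldl (fun o l => o ++ l.reverse) []) := by
  simp [pvHeadB, List.foldl_reverse]

-- Python's `t == marker` any-scan equals List.contains
theorem pv_any_marker (l : List String) :
    (l.any fun t => t == "!!linebreak:original") = l.contains "!!linebreak:original" := by
  induction l with
  | nil => rfl
  | cons x l ih =>
    simp only [List.any_cons, List.contains_cons, ih]
    congr 1
    rw [Bool.eq_iff_iff, beq_iff_eq, beq_iff_eq, eq_comm]

-- B's head processing splits at the first line
theorem pv_headB_split (pre h : List String) (hpre : "<n>" ∉ pre) :
    pvHeadB (pre ++ "<n>" :: h) = pvDropIf (pre ++ ["<n>"]) ++ pvHeadB h := by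
  rw [pv_headB_foldr, pv_headB_foldr]
  simp only [List.foldr_append, List.foldr_cons]
  set st := List.foldr (fun t st => pvStepB st t) (([] : List String), ([] : List (List String))) h with hst
  have hstep : pvStepB st "<n>"
      = (["<n>"], if st.1.contains "!!linebreak:original" then st.2 else st.2 ++ [st.1]) := by
    simp [pvStepB]
  rw [hstep, pv_foldB_pre pre hpre]
  by_cases hm : "!!linebreak:original" ∈ pre
  · have hline : "!!linebreak:original" ∈ pre ++ ["<n>"] := List.mem_append_left _ hm
    simp [pvDropIf, List.contains_eq_mem, hm, hline]
  · have hline : "!!linebreak:original" ∉ pre ++ ["<n>"] := by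
      intro hh
      rcases List.mem_append.mp hh with hh | hh
      · exact hm hh
      · simp at hh
    simp [pvDropIf, List.contains_eq_mem, hm, hline]

theorem pv_headB_noN (h : List String) (hn : "<n>" ∉ h) :
    pvHeadB h = pvDropIf h := by
  rw [pv_headB_foldr]
  rw [show List.foldr (fun t st => pvStepB st t) (([] : List String), ([] : List (List String))) h
      = (h.reverse, []) from (by simpa using pv_foldB_pre h hn [] [])]
  by_cases hm : "!!linebreak:original" ∈ h
  · simp [pvDropIf, List.contains_eq_mem, hm]
  · simp [pvDropIf, List.contains_eq_mem, hm]

-- first-occurrence decomposition at "<n>"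
theorem pv_first_n (l : List String) (h : "<n>" ∈ l) :
    ∃ pre rest, l = pre ++ "<n>" :: rest ∧ "<n>" ∉ pre := by
  induction l with
  | nil => cases h
  | cons t ts ih =>
    by_cases ht : t = "<n>"
    · exact ⟨[], ts, by simp [ht], by simp⟩
    · have : "<n>" ∈ ts := by
        rcases List.mem_cons.mp h with h1 | h1
        · exact absurd h1.symm ht
        · exact h1
      obtain ⟨pre, rest, heq, hpre⟩ := ih this
      exact ⟨t :: pre, rest, by simp [heq], by simp [hpre, Ne.symm, ht]⟩

-- before any "<n>", once a barline is hit the forward scan returns the pending start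
theorem pv_cut_bar_noN (ts : List String) : ∀ i s, "<n>" ∉ ts →
    (ts.any fun t => PySem.Str.startswith t "=") = true → pvCutB ts i s = s := by
  induction ts with
  | nil => intro i s _ hb; simp at hb
  | cons t ts ih =>
    intro i s hn hb
    simp only [pvCutB]
    by_cases hbt : PySem.Str.startswith t "=" = true
    · rw [if_pos hbt]
    · have ht : t ≠ "<n>" := fun hh => hn (hh ▸ List.mem_cons_self)
      rw [if_neg hbt, if_neg ht]
      rw [List.any_cons, Bool.or_eq_true] at hb
      exact ih (i + 1) s (fun hh => hn (List.mem_cons_of_mem _ hh))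
        (by rcases hb with h | h; exacts [absurd h hbt, h])

-- the main induction (on length): B = A
theorem pv_main : ∀ n (tokens : List String), tokens.length ≤ n →
    strip_leading_linebreaks_py_alt tokens = strip_leading_linebreaks_py tokens := by
  intro n
  induction n with
  | zero =>
    intro tokens hlen
    have : tokens = [] := List.eq_nil_of_length_eq_zero (Nat.le_zero.mp hlen)
    subst this; rfl
  | succ n ih =>
    intro tokens hlen
    by_cases hmem : "<n>" ∈ tokens
    · obtain ⟨pre, rest, heq, hpre⟩ := pv_first_n tokens hmem
      subst heq
      have hbuild := pv_buildLines_split pre rest hpre []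
      simp only [List.nil_append] at hbuild
      by_cases hbar : pre.any (fun t => PySem.Str.startswith t "=") = true
      · -- barline in the first line: cut = 0, B returns tokens verbatim; A too
        have hcut : pvCutB (pre ++ "<n>" :: rest) 0 0 = 0 := by
          rw [pv_cut_split pre rest hpre, if_pos hbar]
        rw [pv_altB_eq, hcut]
        simp only [List.take_zero, List.drop_zero]
        have hhead : pvHeadB [] = [] := rfl
        rw [hhead, List.nil_append]
        unfold strip_leading_linebreaks_py
        rw [hbuild]
        simp only [pvResolveA]
        rw [pv_any_filter _ (by decide) (by decide)]
        have : ((pre ++ ["<n>"]).any fun t => PySem.Str.startswith t "=") = true := by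
          rw [List.any_append, hbar, Bool.true_or]
        rw [if_neg (by simp), if_pos this, pv_resolveA_true, pv_buildLines_flatten]
        simp
      · -- no barline in the first line: both drop-or-keep the line and recurse
        have hbar' : (pre.any fun t => PySem.Str.startswith t "=") = false :=
          Bool.not_eq_true _ ▸ (by simpa using hbar)
        have hcut : pvCutB (pre ++ "<n>" :: rest) 0 0
            = pvCutB rest 0 0 + (pre.length + 1) := by
          rw [pv_cut_split pre rest hpre, if_neg (by rw [hbar']; exact Bool.false_ne_true)]
          have := pv_cut_shift rest 0 0 (pre.length + 1)
          simpa [Nat.add_comm, Nat.add_assoc, Nat.zero_add] using this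
        rw [pv_altB_eq, hcut]
        have hsplit_take : (pre ++ "<n>" :: rest).take (pvCutB rest 0 0 + (pre.length + 1))
            = (pre ++ ["<n>"]) ++ rest.take (pvCutB rest 0 0) := by
          rw [show pre ++ "<n>" :: rest = (pre ++ ["<n>"]) ++ rest by simp,
            show pvCutB rest 0 0 + (pre.length + 1) = (pre ++ ["<n>"]).length + pvCutB rest 0 0 by
              simp; omega]
          exact List.take_length_add_append _
        have hsplit_drop : (pre ++ "<n>" :: rest).drop (pvCutB rest 0 0 + (pre.length + 1))
            = rest.drop (pvCutB rest 0 0) := by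
          rw [show pre ++ "<n>" :: rest = (pre ++ ["<n>"]) ++ rest by simp,
            show pvCutB rest 0 0 + (pre.length + 1) = (pre ++ ["<n>"]).length + pvCutB rest 0 0 by
              simp; omega]
          exact List.drop_length_add_append _
        rw [hsplit_take, hsplit_drop]
        have : (pre ++ ["<n>"]) ++ rest.take (pvCutB rest 0 0)
            = pre ++ "<n>" :: rest.take (pvCutB rest 0 0) := by simp
        rw [this, pv_headB_split pre _ hpre]
        have hrest : rest.length ≤ n := by
          have : (pre ++ "<n>" :: rest).length = pre.length + 1 + rest.length := by
            simp; omega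
          omega
        have hih := ih rest hrest
        rw [pv_altB_eq] at hih
        unfold strip_leading_linebreaks_py
        rw [hbuild]
        simp only [pvResolveA]
        rw [pv_any_filter _ (by decide) (by decide), pv_any_filter _ (by decide) (by decide)]
        have hbarline : ((pre ++ ["<n>"]).any fun t => PySem.Str.startswith t "=") = false := by
          rw [List.any_append, hbar', Bool.false_or]; decide
        rw [if_neg (by simp), if_neg (by rw [hbarline]; exact Bool.false_ne_true)]
        by_cases hm : ((pre ++ ["<n>"]).any fun t => t == "!!linebreak:original") = true
        · have hc : ((pre ++ ["<n>"]).contains "!!linebreak:original") = true := by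
            rw [← pv_any_marker]; exact hm
          have hdrop : pvDropIf (pre ++ ["<n>"]) = [] := by unfold pvDropIf; rw [hc]; simp
          rw [if_pos hm, hdrop, List.nil_append]
          rw [hih]
          unfold strip_leading_linebreaks_py
          rfl
        · have hc : ((pre ++ ["<n>"]).contains "!!linebreak:original") = false := by
            rw [← pv_any_marker]; exact Bool.eq_false_iff.mpr hm
          have hdrop : pvDropIf (pre ++ ["<n>"]) = pre ++ ["<n>"] := by unfold pvDropIf; rw [hc]; simp
          rw [if_neg hm, hdrop]
          rw [List.append_assoc, hih]
          unfold strip_leading_linebreaks_py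
          simp
    · -- no "<n>": a single (partial) line
      by_cases hbar : tokens.any (fun t => PySem.Str.startswith t "=") = true
      · have hcut : pvCutB tokens 0 0 = 0 := pv_cut_bar_noN tokens 0 0 hmem hbar
        rw [pv_altB_eq, hcut]
        simp only [List.take_zero, List.drop_zero]
        have hhead : pvHeadB [] = [] := rfl
        rw [hhead, List.nil_append]
        unfold strip_leading_linebreaks_py
        rw [pv_buildLines_noN tokens hmem []]
        by_cases he : tokens = []
        · subst he; rfl
        · simp only [List.nil_append, List.isEmpty_iff, if_neg he]
          simp only [pvResolveA]
          rw [pv_any_filter _ (by decide) (by decide)]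
          rw [if_neg (by simp), if_pos hbar]
          simp
      · have hbar' : (tokens.any fun t => PySem.Str.startswith t "=") = false := by
          simpa using hbar
        have hcut : pvCutB tokens 0 0 = tokens.length := by
          simpa using pv_cut_noN tokens hmem hbar' 0 0
        rw [pv_altB_eq, hcut]
        rw [List.take_of_length_le (le_refl _), List.drop_eq_nil_of_le (le_refl _), List.append_nil]
        rw [pv_headB_noN tokens hmem]
        unfold strip_leading_linebreaks_py
        rw [pv_buildLines_noN tokens hmem []]
        by_cases he : tokens = []
        · subst he; rfl
        · simp only [List.nil_append, List.isEmpty_iff, if_neg he]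
          simp only [pvResolveA]
          rw [pv_any_filter _ (by decide) (by decide), pv_any_filter _ (by decide) (by decide)]
          rw [if_neg (by simp), if_neg (by rw [hbar']; exact Bool.false_ne_true)]
          by_cases hm : (tokens.any fun t => t == "!!linebreak:original") = true
          · rw [if_pos hm]
            have hc : (tokens.contains "!!linebreak:original") = true := by
              rw [← pv_any_marker]; exact hm
            unfold pvDropIf
            rw [hc]
            simp
          · rw [if_neg hm]
            have hc : (tokens.contains "!!linebreak:original") = false := by
              rw [← pv_any_marker]; exact Bool.eq_false_iff.mpr hm
            unfold pvDropIf
            rw [hc]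
            simp

-- ===== VERDICT (by name: the statement is the Claim_ definition above) =====
theorem strip_leading_linebreaks_py_spec : Claim_equal_strip_leading_linebreaks_py := by
  intro tokens _
  unfold Spec_strip_leading_linebreaks_py
  exact (pv_main tokens.length tokens (le_refl _)).symm
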